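-- pv_equiv track=rewrite | github.com/Ocram95/IPv6CC_SoftwareX | helper.py | character_unstuff
-- ===== SOURCE A (Python) =====
-- def character_unstuff(list_to_unstuff, escape_value):
--
-- 	one_skipped = False
--
-- 	tmp = []
--
-- 	for k in range(len(list_to_unstuff)):
-- 		if list_to_unstuff[k] == escape_value:
-- 			if not one_skipped:
-- 				one_skipped = True
-- 				continue
-- 			else:
-- 				one_skipped = False
-- 				tmp.append(list_to_unstuff[k])
-- 		else:
-- 			tmp.append(list_to_unstuff[k])
--
-- 	return tmp
-- ===== SOURCE B (Python) =====
-- def character_unstuff(list_to_unstuff, escape_value):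
-- 	positions = [i for i, x in enumerate(list_to_unstuff) if x == escape_value]
-- 	to_remove = set(positions[0::2])
-- 	return [x for i, x in enumerate(list_to_unstuff) if i not in to_remove]
-- ===== Notes on version B (the rewrite author's own statement) =====
-- stated objective: alternative
-- what changed: Replaces the single pass carrying a toggling one_skipped flag with a two-phase index computation: collect the indices of all escape occurrences, take every other one (positions[0::2]) as the set of escapes to drop, then filter the list by index membership.
import Mathlib
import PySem

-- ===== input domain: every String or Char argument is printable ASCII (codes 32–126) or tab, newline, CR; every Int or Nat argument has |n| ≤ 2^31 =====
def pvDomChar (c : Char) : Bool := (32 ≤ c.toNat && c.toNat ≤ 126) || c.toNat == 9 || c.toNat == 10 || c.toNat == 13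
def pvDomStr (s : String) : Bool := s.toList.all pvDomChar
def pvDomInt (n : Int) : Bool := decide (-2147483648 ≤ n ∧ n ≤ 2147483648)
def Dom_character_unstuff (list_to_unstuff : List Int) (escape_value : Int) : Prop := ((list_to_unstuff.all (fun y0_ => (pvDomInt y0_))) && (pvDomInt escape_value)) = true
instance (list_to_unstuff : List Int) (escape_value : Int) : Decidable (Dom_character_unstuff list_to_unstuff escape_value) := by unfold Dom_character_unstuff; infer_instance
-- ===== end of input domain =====

-- B replaces A's toggling-flag single pass by an index table: collect the escape positions,
-- drop every other one (positions[0::2]), and filter by index membership (alternative decomposition, same cost).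

-- ===== PORT A =====
-- A's loop body: carrying (one_skipped, tmp), branches in A's order.
def unstuffStep (escape_value : Int) (st : Bool × List Int) (x : Int) : Bool × List Int :=
  if x == escape_value then
    if !st.1 then (true, st.2)
    else (false, st.2 ++ [x])
  else (st.1, st.2 ++ [x])

-- A's loop over k in range(len), reading list_to_unstuff[k] in order, as a fold over the elements.
def character_unstuff (list_to_unstuff : List Int) (escape_value : Int) : List Int :=
  (list_to_unstuff.foldl (unstuffStep escape_value) (false, [])).2

-- ===== PORT B =====
def character_unstuff_alt (list_to_unstuff : List Int) (escape_value : Int) : List Int :=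
  let positions : List Int :=
    ((PySem.List.enumerate list_to_unstuff 0).filter (fun p => p.2 == escape_value)).map (·.1)
  let to_remove : PySem.Set Int :=
    PySem.Set.ofList ((PySem.List.slice? positions none none 2).getD [])
  ((PySem.List.enumerate list_to_unstuff 0).filter
    (fun p => !(PySem.Set.contains to_remove p.1))).map (·.2)

-- ===== PRECONDITION & SPEC =====
def Spec_character_unstuff (list_to_unstuff : List Int) (escape_value : Int) (out : List Int) : Prop := out = character_unstuff_alt list_to_unstuff escape_value
instance (list_to_unstuff : List Int) (escape_value : Int) (out : List Int) : Decidable (Spec_character_unstuff list_to_unstuff escape_value out) := by unfold Spec_character_unstuff; infer_instance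

-- ===== CLAIM (what is proved, stated in full; the proofs are below) =====
def Claim_equal_character_unstuff : Prop := ∀ (list_to_unstuff : List Int) (escape_value : Int), Dom_character_unstuff list_to_unstuff escape_value → Spec_character_unstuff list_to_unstuff escape_value (character_unstuff list_to_unstuff escape_value)

-- ===== LEMMAS AND PROOFS =====

-- every-other element, starting with the first (what xs[0::2] computes)
def eo {α : Type} : List α → List α
  | [] => []
  | [a] => [a]
  | a :: _ :: t => a :: eo t

-- every-other element, starting with the second
def oo {α : Type} (l : List α) : List α := eo l.tail

lemma eo_cons {α : Type} (a : α) (t : List α) : eo (a :: t) = a :: oo t := by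
  cases t <;> rfl

lemma eo_subset {α : Type} (l : List α) : eo l ⊆ l := by
  induction l using eo.induct with
  | case1 => simp [eo]
  | case2 a => simp [eo]
  | case3 a b t ih =>
      intro x hx
      simp only [eo, List.mem_cons] at hx ⊢
      rcases hx with h | h
      · exact Or.inl h
      · exact Or.inr (Or.inr (ih h))

lemma oo_subset {α : Type} (l : List α) : oo l ⊆ l := by
  cases l with
  | nil => simp [oo, eo]
  | cons a t => exact fun x hx => List.mem_cons_of_mem a (eo_subset t hx)

lemma filterMap_range_two {α : Type} (xs : List α) :
    List.filterMap (fun k => xs[2*k]?) (List.range ((xs.length+1)/2)) = eo xs := by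
  induction xs using eo.induct with
  | case1 => simp [eo]
  | case2 a => simp [eo]
  | case3 a b t ih =>
      have h : (t.length + 1 + 1 + 1) / 2 = (t.length + 1) / 2 + 1 := by omega
      simp only [List.length_cons, h, List.range_succ_eq_map]
      simp only [List.filterMap_cons, List.filterMap_map, Function.comp, eo]
      simp only [Nat.mul_zero, List.getElem?_cons_zero]
      congr 1

-- xs[0::2] is exactly eo xs
lemma slice?_two (xs : List Int) : PySem.List.slice? xs none none 2 = some (eo xs) := by
  simp only [PySem.List.slice?, PySem.List.sliceIndices]
  norm_num
  rw [← filterMap_range_two]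
  have h2 : (if 0 < xs.length then (((xs.length : Int) + 2 - 1) / 2).toNat else 0) = (xs.length+1)/2 := by
    split_ifs with h <;> omega
  rw [h2]
  apply List.filterMap_congr
  intro k _
  congr 1

-- the common recursive characterization: unstuffing with pending-skip flag b
def unst (e : Int) : List Int → Bool → List Int
  | [], _ => []
  | x :: xs, b =>
      if x = e then (if b then x :: unst e xs false else unst e xs true)
      else x :: unst e xs b

lemma foldlA_eq_unst (e : Int) (xs : List Int) (b : Bool) (acc : List Int) :
    (xs.foldl (unstuffStep e) (b, acc)).2 = acc ++ unst e xs b := by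
  induction xs generalizing b acc with
  | nil => simp [unst]
  | cons x xs ih =>
      rw [List.foldl_cons]
      by_cases hx : x = e
      · cases b with
        | false =>
            rw [show unstuffStep e (false, acc) x = (true, acc) by simp [unstuffStep, hx]]
            rw [ih]
            simp [unst, hx]
        | true =>
            rw [show unstuffStep e (true, acc) x = (false, acc ++ [x]) by simp [unstuffStep, hx]]
            rw [ih]
            simp [unst, hx]
      · rw [show unstuffStep e (b, acc) x = (b, acc ++ [x]) by simp [unstuffStep, hx]]
        rw [ih]
        simp [unst, hx]

-- escape positions of xs enumerated from n
def pos (e : Int) (n : Int) (xs : List Int) : List Int :=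
  ((PySem.List.enumerate xs n).filter (fun p => p.2 == e)).map (·.1)

lemma pos_cons (e n : Int) (x : Int) (xs : List Int) :
    pos e n (x :: xs) = if x = e then n :: pos e (n+1) xs else pos e (n+1) xs := by
  simp only [pos, PySem.List.enumerate_cons, List.filter_cons]
  by_cases hx : x = e <;> simp [hx]

lemma pos_lb (e n : Int) (xs : List Int) : ∀ i ∈ pos e n xs, n ≤ i := by
  intro i hi
  simp only [pos, List.mem_map, List.mem_filter] at hi
  obtain ⟨p, ⟨hp, _⟩, rfl⟩ := hi
  rw [PySem.List.mem_enumerate_iff] at hp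
  obtain ⟨k, _, rfl⟩ := hp
  simp only
  omega

-- main invariant: filtering (enumerate xs n) by "index not removed" computes unst, with
-- removal list eo (pos …) when no skip is pending (flag false) and oo (pos …) when one is (flag true)
lemma filter_remove_eq_unst (e : Int) (xs : List Int) : ∀ (n : Int),
    (((PySem.List.enumerate xs n).filter
        (fun p => !((eo (pos e n xs)).contains p.1))).map (·.2) = unst e xs false)
  ∧ (((PySem.List.enumerate xs n).filter
        (fun p => !((oo (pos e n xs)).contains p.1))).map (·.2) = unst e xs true) := by
  induction xs with
  | nil => intro n; constructor <;> simp [unst, pos, eo, oo]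
  | cons x xs ih =>
      intro n
      have hshift : ∀ (L : List Int),
          ((PySem.List.enumerate xs (n+1)).filter (fun p => !((n :: L).contains p.1))).map (·.2)
            = ((PySem.List.enumerate xs (n+1)).filter (fun p => !(L.contains p.1))).map (·.2) := by
        intro L
        congr 1
        apply List.filter_congr
        intro p hp
        rw [PySem.List.mem_enumerate_iff] at hp
        obtain ⟨k, _, rfl⟩ := hp
        have hne : (n + 1 + (k : Int)) ≠ n := by omega
        simp [hne]
      have hnot : ∀ (L : List Int), (∀ i ∈ L, n + 1 ≤ i) → L.contains n = false := by
        intro L hL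
        rw [List.contains_eq_mem, decide_eq_false_iff_not]
        intro hmem
        have := hL n hmem
        omega
      by_cases hx : x = e
      · constructor
        · -- flag false: removal list eo (n :: P) = n :: oo P; head (index n) dropped
          rw [pos_cons, if_pos hx, eo_cons]
          simp only [PySem.List.enumerate_cons, List.filter_cons]
          have hh : ((n :: oo (pos e (n+1) xs)).contains n) = true := by simp
          rw [hh]
          simp only [Bool.not_true, Bool.false_eq_true, if_false]
          rw [hshift (oo (pos e (n+1) xs)), (ih (n+1)).2]
          simp [unst, hx]
        · -- flag true: removal list oo (n :: P) = eo P; head kept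
          rw [pos_cons, if_pos hx]
          have hoo : oo (n :: pos e (n+1) xs) = eo (pos e (n+1) xs) := rfl
          rw [hoo]
          simp only [PySem.List.enumerate_cons, List.filter_cons]
          have hn : (eo (pos e (n+1) xs)).contains n = false := by
            apply hnot; intro i hi; exact pos_lb e (n+1) xs i (eo_subset _ hi)
          rw [hn]
          simp only [Bool.not_false, if_true, List.map_cons]
          rw [(ih (n+1)).1]
          simp [unst, hx]
      · -- head not the escape: pos unchanged, head never removed
        have hp := pos_cons e n x xs
        rw [if_neg hx] at hp
        constructor
        · rw [hp]
          simp only [PySem.List.enumerate_cons, List.filter_cons]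
          have hn : (eo (pos e (n+1) xs)).contains n = false := by
            apply hnot; intro i hi; exact pos_lb e (n+1) xs i (eo_subset _ hi)
          rw [hn]
          simp only [Bool.not_false, if_true, List.map_cons]
          rw [(ih (n+1)).1]
          simp [unst, hx]
        · rw [hp]
          simp only [PySem.List.enumerate_cons, List.filter_cons]
          have hn : (oo (pos e (n+1) xs)).contains n = false := by
            apply hnot; intro i hi; exact pos_lb e (n+1) xs i (oo_subset _ hi)
          rw [hn]
          simp only [Bool.not_false, if_true, List.map_cons]
          rw [(ih (n+1)).2]
          simp [unst, hx]

-- membership in the Set B builds is membership in the underlying list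
lemma contains_ofList_eq (l : List Int) (x : Int) :
    List.contains (PySem.Set.ofList l) x = List.contains l x := by
  simp only [List.contains_eq_mem]
  simp [PySem.Set.mem_ofList]

lemma alt_eq_unst (xs : List Int) (e : Int) :
    character_unstuff_alt xs e = unst e xs false := by
  unfold character_unstuff_alt
  rw [← (filter_remove_eq_unst e xs 0).1]
  simp only [show ((PySem.List.enumerate xs 0).filter (fun p => p.2 == e)).map (·.1) = pos e 0 xs from rfl]
  simp only [slice?_two, Option.getD_some]
  congr 1
  apply List.filter_congr
  intro p _
  simp only [PySem.Set.contains, contains_ofList_eq]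

-- ===== VERDICT (by name: the statement is the Claim_ definition above) =====
theorem character_unstuff_spec : Claim_equal_character_unstuff := by
  intro xs e _
  unfold Spec_character_unstuff character_unstuff
  rw [foldlA_eq_unst, alt_eq_unst]
  simp
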